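-- pv_equiv track=rewrite | github.com/FBI223/EKGApp | wave_model/main_keras.py | extract_segments_from_prediction
-- ===== SOURCE A (Python) =====
-- def extract_segments_from_prediction(pred_labels):
--     segments = []
--     current_class = pred_labels[0]
--     start = 0
--     for i in range(1, len(pred_labels)):
--         if pred_labels[i] != current_class:
--             if current_class != 0:
--                 segments.append((start, i - 1, current_class))
--             current_class = pred_labels[i]
--             start = i
--     if current_class != 0:
--         segments.append((start, len(pred_labels) - 1, current_class))
--     return segments
-- ===== SOURCE B (Python) =====
-- def extract_segments_from_prediction(pred_labels):
--     # Staged: (1) collect all run-boundary (change-point) indices, (2) pair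
--     # consecutive boundaries with zip and emit the nonzero-class segments.
--     n = len(pred_labels)
--     starts = [i for i in range(n) if i == 0 or pred_labels[i] != pred_labels[i - 1]]
--     bounds = starts + [n]
--     return [(s, e - 1, pred_labels[s])
--             for s, e in zip(bounds, bounds[1:])
--             if pred_labels[s] != 0]
-- ===== Notes on version B (the rewrite author's own statement) =====
-- stated objective: alternative
-- what changed: Replaces A's single-pass state machine (current_class/start bookkeeping) with a staged computation: one comprehension collects all change-point indices, then zip pairs consecutive boundaries and a second comprehension emits the nonzero-class segments.
import Mathlib
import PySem

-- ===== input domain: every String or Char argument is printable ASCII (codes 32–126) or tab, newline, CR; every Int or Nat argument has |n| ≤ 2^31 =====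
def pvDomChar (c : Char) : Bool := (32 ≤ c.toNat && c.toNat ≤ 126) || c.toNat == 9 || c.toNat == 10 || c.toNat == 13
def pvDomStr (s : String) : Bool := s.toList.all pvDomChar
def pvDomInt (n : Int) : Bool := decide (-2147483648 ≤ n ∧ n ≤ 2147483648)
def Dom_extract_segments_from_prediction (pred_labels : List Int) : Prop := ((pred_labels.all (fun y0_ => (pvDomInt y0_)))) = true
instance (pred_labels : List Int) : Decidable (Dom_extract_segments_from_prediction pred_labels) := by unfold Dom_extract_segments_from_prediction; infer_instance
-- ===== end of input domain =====

-- B replaces A's one-pass state machine by staged passes (change-point indices, then zip of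
-- consecutive boundaries); same cost, different decomposition.

-- ===== PORT A =====
-- loop body of A's for-loop; state = (segments, current_class, start, i)
def pvStepA : (List (Int × Int × Int) × Int × Int × Int) → Int → (List (Int × Int × Int) × Int × Int × Int)
  | (segments, current, start, i), v =>
    if v ≠ current then
      ((if current ≠ 0 then segments ++ [(start, i - 1, current)] else segments), v, i, i + 1)
    else (segments, current, start, i + 1)

def extract_segments_from_prediction (pred_labels : List Int) : List (Int × Int × Int) :=
  match pred_labels with
  | [] => []  -- Python raises IndexError reading the first element; excluded by Pre_
  | c0 :: rest =>
    let s := rest.foldl pvStepA ([], c0, 0, 1)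
    if s.2.1 ≠ 0 then s.1 ++ [(s.2.2.1, (pred_labels.length : Int) - 1, s.2.1)] else s.1

-- ===== PORT B =====
-- Source B's first comprehension: change-point indices (indices in range are valid, so getD is exact;
-- for i = 0 the `i == 0` disjunct short-circuits exactly like Python's `or`)
def pvBStarts (xs : List Int) : List Nat :=
  (List.range xs.length).filter (fun i => i == 0 || xs.getD i 0 != xs.getD (i - 1) 0)

def extract_segments_from_prediction_alt (pred_labels : List Int) : List (Int × Int × Int) :=
  let bounds := pvBStarts pred_labels ++ [pred_labels.length]
  -- Source B's zip + filtering comprehension (bounds[1:] = bounds.tail)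
  (bounds.zip bounds.tail).filterMap (fun p =>
    if pred_labels.getD p.1 0 ≠ 0 then some ((p.1 : Int), (p.2 : Int) - 1, pred_labels.getD p.1 0)
    else none)

-- ===== PRECONDITION & SPEC =====
-- A reads the first element, raising IndexError on the empty list; that is the only input excluded.
def Pre_extract_segments_from_prediction (pred_labels : List Int) : Prop := pred_labels ≠ []
instance (pred_labels : List Int) : Decidable (Pre_extract_segments_from_prediction pred_labels) := by unfold Pre_extract_segments_from_prediction; infer_instance
def pvWitness_extract_segments_from_prediction : List Int := [0, 1, 1, 0, 2]

def Spec_extract_segments_from_prediction (pred_labels : List Int) (out : List (Int × Int × Int)) : Prop := out = extract_segments_from_prediction_alt pred_labels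
instance (pred_labels : List Int) (out : List (Int × Int × Int)) : Decidable (Spec_extract_segments_from_prediction pred_labels out) := by unfold Spec_extract_segments_from_prediction; infer_instance

-- ===== CLAIM (what is proved, stated in full; the proofs are below) =====
def Claim_equal_extract_segments_from_prediction : Prop := ∀ (pred_labels : List Int), Dom_extract_segments_from_prediction pred_labels → Pre_extract_segments_from_prediction pred_labels → Spec_extract_segments_from_prediction pred_labels (extract_segments_from_prediction pred_labels)

-- ===== LEMMAS AND PROOFS =====

-- length of the maximal prefix of the list equal to c
def pvRunLen (c : Int) : List Int → Nat
  | [] => 0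
  | x :: t => if x = c then pvRunLen c t + 1 else 0

-- reference run-peeling recursion; both ports are proved equal to pvGoB 0
def pvGoB (idx : Int) : List Int → List (Int × Int × Int)
  | [] => []
  | c :: t =>
    let k : Nat := pvRunLen c t + 1
    let tail := pvGoB (idx + (k : Int)) (t.drop (pvRunLen c t))
    if c ≠ 0 then (idx, idx + (k : Int) - 1, c) :: tail else tail
termination_by l => l.length
decreasing_by
  exact Nat.lt_succ_of_le (le_of_eq_of_le List.length_drop (Nat.sub_le _ _))

-- reference form of A's loop + final append, as structural recursion
def pvRefA (c start i : Int) : List Int → List (Int × Int × Int)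
  | [] => if c ≠ 0 then [(start, i - 1, c)] else []
  | v :: t =>
    if v ≠ c then
      (if c ≠ 0 then (start, i - 1, c) :: pvRefA v i (i + 1) t else pvRefA v i (i + 1) t)
    else pvRefA c start (i + 1) t

-- reference form of B's first comprehension: change points of t, counting from index i, prev value
def pvChpts (i : Nat) (prev : Int) : List Int → List Nat
  | [] => []
  | v :: t => if v ≠ prev then i :: pvChpts (i + 1) v t else pvChpts (i + 1) v t

theorem pvFoldIdx (rest : List Int) (s : List (Int × Int × Int) × Int × Int × Int) :
    (rest.foldl pvStepA s).2.2.2 = s.2.2.2 + rest.length := by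
  induction rest generalizing s with
  | nil => simp
  | cons v t ih =>
    obtain ⟨segs, c, st, i⟩ := s
    simp only [List.foldl_cons, pvStepA, List.length_cons]
    split_ifs <;> rw [ih] <;> push_cast <;> ring

theorem pvFoldRef (rest : List Int) (c start i : Int) (segs : List (Int × Int × Int)) :
    (let s := rest.foldl pvStepA (segs, c, start, i);
     if s.2.1 ≠ 0 then s.1 ++ [(s.2.2.1, s.2.2.2 - 1, s.2.1)] else s.1)
      = segs ++ pvRefA c start i rest := by
  induction rest generalizing c start i segs with
  | nil => simp only [List.foldl_nil, pvRefA]; split_ifs <;> simp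
  | cons v t ih =>
    rw [List.foldl_cons]
    by_cases hv : v = c
    · have hstep : pvStepA (segs, c, start, i) v = (segs, c, start, i + 1) := by
        simp [pvStepA, hv]
      rw [hstep, ih]
      simp [pvRefA, hv]
    · have hv' : v ≠ c := hv
      have hstep : pvStepA (segs, c, start, i) v
          = ((if c ≠ 0 then segs ++ [(start, i - 1, c)] else segs), v, i, i + 1) := by
        simp only [pvStepA]; rw [if_pos hv']
      rw [hstep]
      by_cases hc : c ≠ 0
      · rw [if_pos hc, ih]
        simp only [pvRefA]
        rw [if_pos hv', if_pos hc, List.append_assoc]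
        rfl
      · rw [if_neg hc, ih]
        simp only [pvRefA]
        rw [if_pos hv', if_neg hc]

theorem pvRefGoB (t : List Int) (c start i : Int) :
    pvRefA c start i t
      = (if c ≠ 0 then [(start, i + (pvRunLen c t : Int) - 1, c)] else [])
        ++ pvGoB (i + (pvRunLen c t : Int)) (t.drop (pvRunLen c t)) := by
  induction t generalizing c start i with
  | nil => simp [pvRefA, pvRunLen, pvGoB]
  | cons v t ih =>
    by_cases hv : v = c
    · have h1 : pvRefA c start i (v :: t) = pvRefA c start (i + 1) t := by
        simp [pvRefA, hv]
      have h2 : pvRunLen c (v :: t) = pvRunLen c t + 1 := by simp [pvRunLen, hv]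
      rw [h1, ih, h2]
      have : (i + ((pvRunLen c t : Int) + 1)) = (i + 1 + (pvRunLen c t : Int)) := by ring
      push_cast
      rw [List.drop_succ_cons, this]
    · have h2 : pvRunLen c (v :: t) = 0 := by simp [pvRunLen, hv]
      rw [h2]
      simp only [Nat.cast_zero, add_zero, List.drop_zero]
      have hgo : pvGoB i (v :: t)
          = (if v ≠ 0 then [(i, i + ((pvRunLen v t : Int) + 1) - 1, v)] else [])
            ++ pvGoB (i + ((pvRunLen v t : Int) + 1)) (t.drop (pvRunLen v t)) := by
        rw [pvGoB]
        push_cast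
        split_ifs <;> simp
      have hl : pvRefA c start i (v :: t)
          = (if c ≠ 0 then [(start, i - 1, c)] else []) ++ pvRefA v i (i + 1) t := by
        simp only [pvRefA, if_pos (by simpa using hv)]
        split_ifs <;> simp
      rw [hl, ih, hgo]
      have : i + 1 + (pvRunLen v t : Int) = i + ((pvRunLen v t : Int) + 1) := by ring
      rw [this]

theorem pvRunLen_le (c : Int) (t : List Int) : pvRunLen c t ≤ t.length := by
  induction t with
  | nil => simp [pvRunLen]
  | cons x s ih =>
    by_cases hx : x = c
    · simp only [pvRunLen, if_pos hx, List.length_cons]; omega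
    · simp [pvRunLen, hx]

theorem pvGoB_nil (idx : Int) : pvGoB idx [] = [] := by rw [pvGoB]

theorem pvGoB_cons (idx c : Int) (t : List Int) :
    pvGoB idx (c :: t)
      = (if c ≠ 0 then [(idx, idx + (pvRunLen c t : Int), c)] else [])
        ++ pvGoB (idx + (pvRunLen c t : Int) + 1) (t.drop (pvRunLen c t)) := by
  rw [pvGoB]
  have h1 : idx + ((pvRunLen c t + 1 : Nat) : Int) - 1 = idx + (pvRunLen c t : Int) := by
    push_cast; ring
  have h2 : idx + ((pvRunLen c t + 1 : Nat) : Int) = idx + (pvRunLen c t : Int) + 1 := by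
    push_cast; ring
  rw [h1, h2]
  split_ifs <;> simp

-- B's filter over range' i equals pvChpts, given the invariants relating i, prev and the suffix
theorem pvFilterChpts (l : List Int) : ∀ (xs : List Int) (i : Nat) (prev : Int),
    1 ≤ i → xs.getD (i - 1) 0 = prev → xs.drop i = l →
    (List.range' i l.length).filter (fun j => j == 0 || xs.getD j 0 != xs.getD (j - 1) 0)
      = pvChpts i prev l := by
  induction l with
  | nil => intro xs i prev _ _ _; simp [pvChpts]
  | cons v t ih =>
    intro xs i prev hi hprev hdrop
    have hlt : i < xs.length := by
      by_contra h
      rw [List.drop_eq_nil_of_le (by omega)] at hdrop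
      simp at hdrop
    have hv : xs.getD i 0 = v := by
      have : xs.getD i 0 = (xs.drop i).getD 0 0 := by
        simp [List.getD, List.getElem?_drop]
      rw [this, hdrop]; rfl
    have hdrop' : xs.drop (i + 1) = t := by
      have : xs.drop (i + 1) = (xs.drop i).drop 1 := by rw [List.drop_drop]
      rw [this, hdrop]; rfl
    rw [List.length_cons, List.range'_succ, List.filter_cons]
    have hrec := ih xs (i + 1) v (by omega) (by simpa using hv) hdrop'
    by_cases hne : v ≠ prev
    · have hcond : (i == 0 || xs.getD i 0 != xs.getD (i - 1) 0) = true := by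
        simp only [Bool.or_eq_true, beq_iff_eq, bne_iff_ne]
        right; rw [hv, hprev]; exact hne
      rw [hcond, hrec]
      simp [pvChpts, hne]
    · rw [not_ne_iff] at hne
      have hcond : (i == 0 || xs.getD i 0 != xs.getD (i - 1) 0) = false := by
        simp only [Bool.or_eq_false_iff, beq_eq_false_iff_ne, bne_eq_false_iff_eq]
        exact ⟨by omega, by rw [hv, hprev, hne]⟩
      rw [hcond, hrec]
      simp [pvChpts, hne]

theorem pvBStarts_eq (c : Int) (t : List Int) :
    pvBStarts (c :: t) = 0 :: pvChpts 1 c t := by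
  unfold pvBStarts
  rw [List.length_cons, List.range_eq_range', List.range'_succ, List.filter_cons]
  have h0 : ((0 : Nat) == 0 || (c :: t).getD 0 0 != (c :: t).getD (0 - 1) 0) = true := by simp
  rw [h0, if_pos rfl, pvFilterChpts t (c :: t) 1 c (by omega) (by rfl) (by rfl)]

-- pvChpts skips over the initial run
theorem pvChpts_run (t : List Int) : ∀ (j : Nat) (c : Int),
    pvChpts j c t = pvChpts (j + pvRunLen c t) c (t.drop (pvRunLen c t)) := by
  induction t with
  | nil => intro j c; simp [pvRunLen]
  | cons x t ih =>
    intro j c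
    by_cases hx : x = c
    · subst hx
      have h1 : pvChpts j x (x :: t) = pvChpts (j + 1) x t := by simp [pvChpts]
      have h2 : pvRunLen x (x :: t) = pvRunLen x t + 1 := by simp [pvRunLen]
      rw [h1, h2, List.drop_succ_cons, ih (j + 1) x]
      congr 1
      omega
    · simp [pvRunLen, hx]

theorem pvRunLen_head (c : Int) (t : List Int) (v : Int) (t' : List Int)
    (h : t.drop (pvRunLen c t) = v :: t') : v ≠ c := by
  induction t generalizing v t' with
  | nil => simp [pvRunLen] at h
  | cons x t ih =>
    by_cases hx : x = c
    · rw [pvRunLen, if_pos hx, List.drop_succ_cons] at h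
      exact ih _ _ h
    · rw [pvRunLen, if_neg hx, List.drop_zero] at h
      cases h; exact hx

-- main B-side lemma: zipping consecutive boundaries starting at i yields pvGoB i
theorem pvZipGoB (n : Nat) : ∀ (t : List Int), t.length ≤ n → ∀ (c : Int) (i : Nat) (xs : List Int),
    xs.drop i = c :: t →
    (((i :: pvChpts (i + 1) c t) ++ [xs.length]).zip
        (((i :: pvChpts (i + 1) c t) ++ [xs.length]).tail)).filterMap (fun p =>
      if xs.getD p.1 0 ≠ 0 then some ((p.1 : Int), (p.2 : Int) - 1, xs.getD p.1 0) else none)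
      = pvGoB (i : Int) (c :: t) := by
  induction n with
  | zero =>
    intro t ht c i xs hdrop
    have ht0 : t = [] := List.length_eq_zero_iff.mp (by omega)
    subst ht0
    have hlen : xs.length = i + 1 := by
      have h := congrArg List.length hdrop
      rw [List.length_drop, List.length_cons] at h
      have hlt : i < xs.length := by
        by_contra hcon
        rw [List.drop_eq_nil_of_le (by omega)] at hdrop
        simp at hdrop
      simp at h; omega
    have hv : xs.getD i 0 = c := by
      have : xs.getD i 0 = (xs.drop i).getD 0 0 := by
        simp [List.getD, List.getElem?_drop]
      rw [this, hdrop]; rfl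
    rw [pvGoB_cons]
    simp only [pvChpts, pvRunLen, List.drop_nil, pvGoB_nil, List.nil_append, List.cons_append,
      List.tail_cons, List.zip_cons_cons, List.zip_nil_right, List.filterMap_cons,
      List.filterMap_nil, hv, hlen]
    by_cases hc : c ≠ 0
    · rw [if_pos hc, if_pos hc]
      push_cast; ring_nf
      simp
    · rw [if_neg hc, if_neg hc]
      rfl
  | succ n ih =>
    intro t ht c i xs hdrop
    have hlt : i < xs.length := by
      by_contra h
      rw [List.drop_eq_nil_of_le (by omega)] at hdrop
      simp at hdrop
    have hlen : xs.length = i + 1 + t.length := by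
      have h := congrArg List.length hdrop
      rw [List.length_drop, List.length_cons] at h
      omega
    have hv : xs.getD i 0 = c := by
      have : xs.getD i 0 = (xs.drop i).getD 0 0 := by
        simp [List.getD, List.getElem?_drop]
      rw [this, hdrop]; rfl
    set r := pvRunLen c t with hr
    rw [pvChpts_run t (i + 1) c, ← hr]
    cases hd : t.drop r with
    | nil =>
      -- single run: t is all c
      have hre : r = t.length := by
        have h1 : r ≤ t.length := hr ▸ pvRunLen_le c t
        have h2 := congrArg List.length hd
        rw [List.length_drop] at h2
        simp at h2; omega
      rw [pvGoB_cons, ← hr, hd, pvGoB_nil]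
      simp only [pvChpts, List.nil_append, List.cons_append, List.tail_cons,
        List.zip_cons_cons, List.zip_nil_right, List.filterMap_cons, List.filterMap_nil, hv]
      by_cases hc : c ≠ 0
      · rw [if_pos hc, if_pos hc]
        rw [hlen, hre]
        push_cast; ring_nf
        simp
      · rw [if_neg hc, if_neg hc]
        rfl
    | cons v t' =>
      have hvne : v ≠ c := pvRunLen_head c t v t' (by rw [← hr]; exact hd)
      have hdrop2 : xs.drop (i + 1 + r) = v :: t' := by
        have h1 : xs.drop (i + 1) = t := by
          have : xs.drop (i + 1) = (xs.drop i).drop 1 := by rw [List.drop_drop]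
          rw [this, hdrop]; rfl
        have h2 : xs.drop (i + 1 + r) = (xs.drop (i + 1)).drop r := by
          rw [List.drop_drop]
        rw [h2, h1, hd]
      have ht' : t'.length ≤ n := by
        have h2 := congrArg List.length hd
        rw [List.length_drop, List.length_cons] at h2
        have := hr ▸ pvRunLen_le c t
        omega
      rw [pvChpts, if_pos hvne]
      have hrec := ih t' ht' v (i + 1 + r) xs hdrop2
      simp only [List.cons_append, List.tail_cons] at hrec
      have e1 : ((i + 1 + r : Nat) : Int) - 1 = (i : Int) + (r : Int) := by push_cast; ring
      have e2 : ((i + 1 + r : Nat) : Int) = (i : Int) + (r : Int) + 1 := by push_cast; ring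
      simp only [List.cons_append, List.tail_cons, List.zip_cons_cons, List.filterMap_cons, hv]
      rw [hrec, pvGoB_cons (i : Int) c t, ← hr, hd, e1, e2]
      by_cases hc : c ≠ 0
      · rw [if_pos hc, if_pos hc]
        rfl
      · rw [if_neg hc, if_neg hc]
        rfl
  
theorem pvAlt_goB (xs : List Int) : extract_segments_from_prediction_alt xs = pvGoB 0 xs := by
  cases xs with
  | nil => rw [pvGoB_nil]; rfl
  | cons c t =>
    unfold extract_segments_from_prediction_alt
    rw [pvBStarts_eq]
    exact pvZipGoB t.length t (le_refl _) c 0 (c :: t) rfl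

-- ===== VERDICT (by name: the statement is the Claim_ definition above) =====
theorem extract_segments_from_prediction_spec : Claim_equal_extract_segments_from_prediction := by
  intro xs _ hpre
  unfold Spec_extract_segments_from_prediction
  rw [pvAlt_goB]
  match xs, hpre with
  | c0 :: rest, _ =>
    show (let s := rest.foldl pvStepA ([], c0, 0, 1);
      if s.2.1 ≠ 0 then s.1 ++ [(s.2.2.1, ((c0 :: rest).length : Int) - 1, s.2.1)] else s.1)
        = pvGoB 0 (c0 :: rest)
    have hidx : (rest.foldl pvStepA ([], c0, 0, 1)).2.2.2 = ((c0 :: rest).length : Int) := by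
      rw [pvFoldIdx]; simp; ring
    rw [← hidx, pvFoldRef, pvRefGoB]
    rw [pvGoB]
    push_cast
    simp only [zero_add, List.nil_append]
    split_ifs <;> simp [add_comm]
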